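-- pv_equiv track=rewrite | github.com/kivy/pyobjus | tools/buildprotocols.py | _tokenize_delegate
-- ===== SOURCE A (Python) =====
-- def _tokenize_delegate(line):
--     token = ""
--     while line:
--         # print 'tokenize', line
--         if line[0] == "(":
--             if token:
--                 yield token
--             token = ""
--             end = line.index(")")
--             yield line[: end + 1]
--             line = line[end + 1 :]
--             continue
--
--         if line[0] == " " or line[0] == ";":
--             if token:
--                 yield token
--             token = ""
--             line = line[1:]
--             continue
--
--         token = token + line[0]
--         line = line[1:]
--
--     if token:
--         yield token
-- ===== SOURCE B (Python) =====
-- def _tokenize_delegate(line):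
--     # single left-to-right state machine over the characters: a current-token
--     # buffer plus an "inside a (...) group" flag; no slicing, no index() scans
--     tokens = []
--     cur = ""
--     inparen = False
--     for c in line:
--         if inparen:
--             cur += c
--             if c == ")":
--                 tokens.append(cur)
--                 cur = ""
--                 inparen = False
--         elif c == "(":
--             if cur:
--                 tokens.append(cur)
--             cur = c
--             inparen = True
--         elif c == " " or c == ";":
--             if cur:
--                 tokens.append(cur)
--             cur = ""
--         else:
--             cur += c
--     if cur:
--         tokens.append(cur)
--     yield from tokens
-- ===== Notes on version B (the rewrite author's own statement) =====
-- stated objective: faster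
-- what changed: A repeatedly slices the remaining string and rescans it with index(')'); B is a single character-by-character state machine (current-token buffer plus an inside-parentheses flag) that never slices or rescans.
import Mathlib
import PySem

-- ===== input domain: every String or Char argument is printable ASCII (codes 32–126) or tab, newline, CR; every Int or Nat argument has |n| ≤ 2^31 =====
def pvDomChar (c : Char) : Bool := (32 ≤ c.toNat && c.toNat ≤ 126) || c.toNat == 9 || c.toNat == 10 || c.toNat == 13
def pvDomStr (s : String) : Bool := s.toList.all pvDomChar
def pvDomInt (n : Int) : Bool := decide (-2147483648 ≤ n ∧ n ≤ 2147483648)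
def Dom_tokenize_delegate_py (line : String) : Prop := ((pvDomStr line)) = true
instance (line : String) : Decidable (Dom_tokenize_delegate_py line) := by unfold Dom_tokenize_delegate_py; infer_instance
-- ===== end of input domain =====

-- B replaces A's repeated string slicing and index(')') rescans with a single
-- character-by-character state machine (objective: faster, O(n) vs O(n^2)).
-- Both generators' yielded sequences are compared as lists; where A raises
-- ValueError (a '(' with no ')' after it) the input is excluded by Pre_.

-- ===== PORT A =====
-- "if token: yield token; token = ''" — A's pending-token flush
def pvEmitA (token : List Char) : List String :=
  if token.isEmpty then [] else [String.mk token]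

-- the while loop of A: state = (remaining line, accumulated token)
def pvTokA : List Char → List Char → List String
  | [], token => pvEmitA token
  | c :: rest, token =>
    if c = '(' then
      match PySem.List.index? (c :: rest) ')' with
      | none => pvEmitA token   -- Python: line.index(")") raises ValueError (outside Pre_)
      | some e =>
          pvEmitA token ++
            (String.mk ((c :: rest).take (e + 1)) :: pvTokA ((c :: rest).drop (e + 1)) [])
    else if c = ' ' ∨ c = ';' then
      pvEmitA token ++ pvTokA rest []
    else
      pvTokA rest (token ++ [c])
termination_by l _ => l.length
decreasing_by all_goals simp

def tokenize_delegate_py (line : String) : List String :=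
  pvTokA line.toList []

-- ===== PORT B =====
-- one step of B's for-loop; state = (tokens so far, current token, inparen flag)
def pvStepB (st : List String × List Char × Bool) (c : Char) :
    List String × List Char × Bool :=
  match st with
  | (tokens, cur, inparen) =>
    if inparen then
      if c = ')' then (tokens ++ [String.mk (cur ++ [c])], [], false)
      else (tokens, cur ++ [c], true)
    else if c = '(' then
      ((if cur.isEmpty then tokens else tokens ++ [String.mk cur]), [c], true)
    else if c = ' ' ∨ c = ';' then
      ((if cur.isEmpty then tokens else tokens ++ [String.mk cur]), [], false)
    else (tokens, cur ++ [c], false)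

def tokenize_delegate_py_alt (line : String) : List String :=
  match line.toList.foldl pvStepB ([], [], false) with
  | (tokens, cur, _) => tokens ++ (if cur.isEmpty then [] else [String.mk cur])

-- ===== PRECONDITION & SPEC =====
-- Pre_ excludes exactly the inputs on which A raises ValueError: a '(' whose suffix
-- holds no ')' (equivalently, no ')' occurs after the last '(').
def Pre_tokenize_delegate_py (line : String) : Prop :=
  '(' ∈ line.toList → ')' ∈ line.toList.reverse.takeWhile (· ≠ '(')
instance (line : String) : Decidable (Pre_tokenize_delegate_py line) := by
  unfold Pre_tokenize_delegate_py; infer_instance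

def pvWitness_tokenize_delegate_py : String := "ab(c; d)- e;f"

def Spec_tokenize_delegate_py (line : String) (out : List String) : Prop := out = tokenize_delegate_py_alt line
instance (line : String) (out : List String) : Decidable (Spec_tokenize_delegate_py line out) := by unfold Spec_tokenize_delegate_py; infer_instance

-- ===== CLAIM (what is proved, stated in full; the proofs are below) =====
def Claim_equal_tokenize_delegate_py : Prop := ∀ (line : String), Dom_tokenize_delegate_py line → Pre_tokenize_delegate_py line → Spec_tokenize_delegate_py line (tokenize_delegate_py line)

-- ===== LEMMAS AND PROOFS =====

-- "every '(' in l is followed by some ')'" — the invariant form of Pre_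
def pvGood (l : List Char) : Prop :=
  ∀ u v : List Char, l = u ++ '(' :: v → ')' ∈ v

-- a ')' inside takeWhile (. ≠ '(') of a ++ '(' :: b lies inside a
lemma pvTW : ∀ (a b : List Char), ')' ∈ (a ++ '(' :: b).takeWhile (· ≠ '(') → ')' ∈ a := by
  intro a
  induction a with
  | nil =>
    intro b h
    rw [List.nil_append, List.takeWhile_cons_of_neg (by simp)] at h
    simp at h
  | cons x t ih =>
    intro b h
    by_cases hx : x = '('
    · subst hx
      rw [List.cons_append, List.takeWhile_cons_of_neg (by simp)] at h
      simp at h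
    · rw [List.cons_append, List.takeWhile_cons_of_pos (by simpa using hx)] at h
      rcases List.mem_cons.mp h with h2 | h2
      · exact h2 ▸ List.mem_cons_self
      · exact List.mem_cons_of_mem _ (ih b h2)

lemma pvGood_of_pre (l : List Char)
    (h : '(' ∈ l → ')' ∈ l.reverse.takeWhile (· ≠ '(')) : pvGood l := by
  intro u v huv
  have hmem : '(' ∈ l := by subst huv; simp
  have h' := h hmem
  have hrev : l.reverse = v.reverse ++ '(' :: u.reverse := by
    subst huv; simp
  rw [hrev] at h'
  have : ')' ∈ v.reverse := pvTW v.reverse u.reverse h'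
  simpa using this

lemma pvGood_cons (c : Char) (rest : List Char) (h : pvGood (c :: rest)) :
    pvGood rest := by
  intro u v huv
  exact h (c :: u) v (by simp [huv])

lemma pvGood_drop (l : List Char) (n : Nat) (h : pvGood l) :
    pvGood (l.drop n) := by
  intro u v huv
  exact h (l.take n ++ u) v (by rw [List.append_assoc, ← huv, List.take_append_drop])

-- B's loop crossing a parenthesised group: from the char after '(' with the
-- flag set, it appends every char up to the first ')' to cur, then flushes.
lemma pvStepB_paren : ∀ (l : List Char) (e : Nat), PySem.List.index? l ')' = some e →
    ∀ (tokens : List String) (cur : List Char),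
    l.foldl pvStepB (tokens, cur, true) =
      (l.drop (e + 1)).foldl pvStepB
        (tokens ++ [String.mk (cur ++ l.take (e + 1))], [], false) := by
  intro l
  induction l with
  | nil => intro e he; simp [PySem.List.index?] at he
  | cons c rest ih =>
    intro e he tokens cur
    by_cases hc : c = ')'
    · subst hc
      rw [PySem.List.index?_cons_self] at he
      have he0 : e = 0 := by simpa using he.symm
      subst he0
      simp [List.foldl_cons, pvStepB]
    · rw [PySem.List.index?_cons_of_ne rest hc] at he
      rcases Option.map_eq_some_iff.mp he with ⟨e', he', rfl⟩
      rw [List.foldl_cons]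
      have hstep : pvStepB (tokens, cur, true) c = (tokens, cur ++ [c], true) := by
        simp [pvStepB, hc]
      rw [hstep, ih e' he' tokens (cur ++ [c])]
      simp [List.take_succ_cons, List.drop_succ_cons]

-- the key invariant: finishing B's fold from a flag-down state equals
-- prepending tokens to A's remaining computation with the same pending token
lemma pvKey : ∀ (n : Nat) (l : List Char), l.length ≤ n → pvGood l →
    ∀ (tokens : List String) (cur : List Char),
    (match l.foldl pvStepB (tokens, cur, false) with
     | (ts, c2, _) => ts ++ (if c2.isEmpty then [] else [String.mk c2])) =
      tokens ++ pvTokA l cur := by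
  intro n
  induction n with
  | zero =>
    intro l hl _ tokens cur
    have h0 : l = [] := List.eq_nil_of_length_eq_zero (Nat.le_zero.mp hl)
    subst h0
    have hA : pvTokA [] cur = pvEmitA cur := by rw [pvTokA]
    simp [hA, pvEmitA]
  | succ n ih =>
    intro l hl hg tokens cur
    cases l with
    | nil =>
      have hA : pvTokA [] cur = pvEmitA cur := by rw [pvTokA]
      simp [hA, pvEmitA]
    | cons c rest =>
      have hr : rest.length ≤ n := by simpa using hl
      by_cases hc : c = '('
      · subst hc
        have hmem : ')' ∈ rest := hg [] rest rfl
        obtain ⟨e', he'⟩ := Option.isSome_iff_exists.mp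
          ((PySem.List.index?_isSome_iff rest ')').mpr hmem)
        have hidx : PySem.List.index? ('(' :: rest) ')' = some (e' + 1) := by
          rw [PySem.List.index?_cons_of_ne rest (by decide), he']; rfl
        have hA : pvTokA ('(' :: rest) cur =
            pvEmitA cur ++ (String.mk (('(' :: rest).take (e' + 1 + 1)) ::
              pvTokA (('(' :: rest).drop (e' + 1 + 1)) []) := by
          rw [pvTokA, if_pos rfl, hidx]
        have hstep : pvStepB (tokens, cur, false) '(' =
            (tokens ++ pvEmitA cur, ['('], true) := by
          by_cases hcur : cur.isEmpty <;> simp [pvStepB, pvEmitA, hcur]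
        rw [List.foldl_cons, hstep, pvStepB_paren rest e' he']
        have hgd : pvGood (rest.drop (e' + 1)) :=
          pvGood_drop rest (e' + 1) (pvGood_cons _ _ hg)
        have hld : (rest.drop (e' + 1)).length ≤ n := by
          simp only [List.length_drop]; omega
        rw [ih _ hld hgd]
        rw [hA]
        simp [List.take_succ_cons, List.drop_succ_cons]
      · by_cases hsep : c = ' ' ∨ c = ';'
        · have hA : pvTokA (c :: rest) cur = pvEmitA cur ++ pvTokA rest [] := by
            rw [pvTokA, if_neg hc, if_pos hsep]
          have hstep : pvStepB (tokens, cur, false) c =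
              (tokens ++ pvEmitA cur, [], false) := by
            by_cases hcur : cur.isEmpty <;>
              simp [pvStepB, pvEmitA, hc, hsep, hcur]
          rw [List.foldl_cons, hstep, ih rest hr (pvGood_cons _ _ hg)]
          simp [hA]
        · have hA : pvTokA (c :: rest) cur = pvTokA rest (cur ++ [c]) := by
            rw [pvTokA, if_neg hc, if_neg hsep]
          have hstep : pvStepB (tokens, cur, false) c =
              (tokens, cur ++ [c], false) := by
            simp [pvStepB, hc, hsep]
          rw [List.foldl_cons, hstep, ih rest hr (pvGood_cons _ _ hg), hA]

-- ===== VERDICT (by name: the statement is the Claim_ definition above) =====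
theorem tokenize_delegate_py_spec : Claim_equal_tokenize_delegate_py := by
  intro line _ hpre
  unfold Spec_tokenize_delegate_py tokenize_delegate_py tokenize_delegate_py_alt
  have := pvKey line.toList.length line.toList le_rfl
    (pvGood_of_pre line.toList hpre) [] []
  simpa using this.symm
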